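-- pv_equiv track=rewrite | github.com/victor-cortez/Heimdall | Benchslave.py | process
-- ===== SOURCE A (Python) =====
-- def process(item):
--     alfabeto = ["a","b","c","d","e","f","g","h","i","j","k","l","m","n","o","p","q","r","s","t","u","v","w","x","y","z"]
--     for a in alfabeto:
--         for b in alfabeto:
--             for c in alfabeto:
--                 for d in alfabeto:
--                     for e in alfabeto:
--                         if a+b+c+d+e == item:
--                             return True
-- ===== SOURCE B (Python) =====
-- def process(item):
--     # direct length-and-range test instead of enumerating all 26^5 candidate words
--     if len(item) == 5 and all('a' <= ch <= 'z' for ch in item):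
--         return True
-- ===== Notes on version B (the rewrite author's own statement) =====
-- stated objective: faster
-- what changed: A enumerates all 26^5 five-letter lowercase words in five nested loops and compares each to item; B directly checks len(item)==5 and that every character is in 'a'..'z'.
import Mathlib
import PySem

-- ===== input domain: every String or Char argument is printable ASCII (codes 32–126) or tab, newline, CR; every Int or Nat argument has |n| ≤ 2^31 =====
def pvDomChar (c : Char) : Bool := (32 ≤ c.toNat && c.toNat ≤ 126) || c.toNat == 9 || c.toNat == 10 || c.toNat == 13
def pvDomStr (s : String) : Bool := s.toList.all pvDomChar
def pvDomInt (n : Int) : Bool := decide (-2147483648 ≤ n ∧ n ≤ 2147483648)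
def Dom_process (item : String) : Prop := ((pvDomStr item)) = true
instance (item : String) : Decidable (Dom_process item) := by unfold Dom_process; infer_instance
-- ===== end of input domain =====

-- B replaces A's enumeration of all 26^5 five-letter lowercase words by a direct
-- length-and-character test (objective: faster).

-- ===== PORT A =====
-- Python strings are ported as their character lists (exact: all literals are ASCII).
def alfabeto : List (List Char) :=
  [['a'],['b'],['c'],['d'],['e'],['f'],['g'],['h'],['i'],['j'],['k'],['l'],['m'],
   ['n'],['o'],['p'],['q'],['r'],['s'],['t'],['u'],['v'],['w'],['x'],['y'],['z']]

-- innermost 'for e in alfabeto' with the early 'return True'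
def loopE (item a b c d : List Char) : List (List Char) → Option Bool
  | [] => none
  | e :: es => if a ++ b ++ c ++ d ++ e = item then some true else loopE item a b c d es

-- 'for d in alfabeto' (an early return from the inner loop propagates out)
def loopD (item a b c : List Char) : List (List Char) → Option Bool
  | [] => none
  | d :: ds =>
    match loopE item a b c d alfabeto with
    | some v => some v
    | none => loopD item a b c ds

def loopC (item a b : List Char) : List (List Char) → Option Bool
  | [] => none
  | c :: cs =>
    match loopD item a b c alfabeto with
    | some v => some v
    | none => loopC item a b cs

def loopB (item a : List Char) : List (List Char) → Option Bool
  | [] => none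
  | b :: bs =>
    match loopC item a b alfabeto with
    | some v => some v
    | none => loopB item a bs

def loopA (item : List Char) : List (List Char) → Option Bool
  | [] => none
  | a :: as_ =>
    match loopB item a alfabeto with
    | some v => some v
    | none => loopA item as_

def process (item : String) : Option Bool := loopA item.toList alfabeto

-- ===== PORT B =====
-- lowercase-letter test from Source B
def pvLower (ch : Char) : Bool := decide ('a' ≤ ch) && decide (ch ≤ 'z')

def process_alt (item : String) : Option Bool :=
  if item.toList.length = 5 ∧ item.toList.all pvLower then some true else none

-- ===== PRECONDITION & SPEC =====
def Spec_process (item : String) (out : Option Bool) : Prop := out = process_alt item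
instance (item : String) (out : Option Bool) : Decidable (Spec_process item out) := by unfold Spec_process; infer_instance

-- ===== CLAIM (what is proved, stated in full; the proofs are below) =====
def Claim_equal_process : Prop := ∀ (item : String), Dom_process item → Spec_process item (process item)

-- ===== LEMMAS AND PROOFS =====

-- a 'for' loop that returns True on the first x with Q x and otherwise falls through
theorem find_if {α : Type} (Q : α → Prop) [DecidablePred Q] (g : List α → Option Bool)
    (h_nil : g [] = none)
    (h_cons : ∀ x xs, g (x :: xs) = if Q x then some true else g xs) :
    ∀ l, g l = if ∃ x ∈ l, Q x then some true else none := by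
  intro l
  induction l with
  | nil => simp [h_nil]
  | cons x xs ih =>
    rw [h_cons, ih]
    by_cases hx : Q x
    · rw [if_pos hx, if_pos ⟨x, List.mem_cons_self, hx⟩]
    · rw [if_neg hx]
      by_cases h2 : ∃ y ∈ xs, Q y
      · obtain ⟨y, hy, hQ⟩ := h2
        rw [if_pos ⟨y, hy, hQ⟩, if_pos ⟨y, List.mem_cons_of_mem x hy, hQ⟩]
      · rw [if_neg h2, if_neg]
        rintro ⟨y, hy, hQ⟩
        rcases List.mem_cons.mp hy with rfl | hy'
        · exact hx hQ
        · exact h2 ⟨y, hy', hQ⟩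

theorem matchOptIf (P : Prop) [Decidable P] (r : Option Bool) :
    (match (if P then some true else none : Option Bool) with
      | some v => some v
      | none => r) = if P then some true else r := by
  split_ifs <;> rfl

theorem loopE_eq (item a b c d : List Char) (l : List (List Char)) :
    loopE item a b c d l =
      if ∃ e ∈ l, a ++ b ++ c ++ d ++ e = item then some true else none :=
  find_if _ (loopE item a b c d) rfl (fun _ _ => rfl) l

theorem loopD_eq (item a b c : List Char) (l : List (List Char)) :
    loopD item a b c l =
      if ∃ d ∈ l, ∃ e ∈ alfabeto, a ++ b ++ c ++ d ++ e = item then some true else none :=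
  find_if _ (loopD item a b c) rfl
    (fun d ds => by simp only [loopD]; rw [loopE_eq]; exact matchOptIf _ _) l

theorem loopC_eq (item a b : List Char) (l : List (List Char)) :
    loopC item a b l =
      if ∃ c ∈ l, ∃ d ∈ alfabeto, ∃ e ∈ alfabeto, a ++ b ++ c ++ d ++ e = item
      then some true else none :=
  find_if _ (loopC item a b) rfl
    (fun c cs => by simp only [loopC]; rw [loopD_eq]; exact matchOptIf _ _) l

theorem loopB_eq (item a : List Char) (l : List (List Char)) :
    loopB item a l =
      if ∃ b ∈ l, ∃ c ∈ alfabeto, ∃ d ∈ alfabeto, ∃ e ∈ alfabeto, a ++ b ++ c ++ d ++ e = item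
      then some true else none :=
  find_if _ (loopB item a) rfl
    (fun b bs => by simp only [loopB]; rw [loopC_eq]; exact matchOptIf _ _) l

theorem loopA_eq (item : List Char) (l : List (List Char)) :
    loopA item l =
      if ∃ a ∈ l, ∃ b ∈ alfabeto, ∃ c ∈ alfabeto, ∃ d ∈ alfabeto, ∃ e ∈ alfabeto,
          a ++ b ++ c ++ d ++ e = item
      then some true else none :=
  find_if _ (loopA item) rfl
    (fun a as_ => by simp only [loopA]; rw [loopB_eq]; exact matchOptIf _ _) l

-- characterisation of alphabet membership by character bounds
theorem mem_alfabeto_of_bounds (c : Char) (h : 97 ≤ c.toNat) (h2 : c.toNat ≤ 122) :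
    [c] ∈ alfabeto := by
  have hc : Char.ofNat c.toNat = c := Char.ofNat_toNat c
  rw [← hc]
  generalize c.toNat = n at h h2 ⊢
  interval_cases n <;> decide

theorem bounds_of_mem_alfabeto (s : List Char) (h : s ∈ alfabeto) :
    ∃ c, s = [c] ∧ 97 ≤ c.toNat ∧ c.toNat ≤ 122 := by
  simp only [alfabeto, List.mem_cons, List.not_mem_nil, or_false] at h
  rcases h with rfl|rfl|rfl|rfl|rfl|rfl|rfl|rfl|rfl|rfl|rfl|rfl|rfl|rfl|rfl|rfl|rfl|rfl|rfl|rfl|rfl|rfl|rfl|rfl|rfl|rfl <;>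
    exact ⟨_, rfl, by decide, by decide⟩

theorem pvLower_iff (c : Char) : pvLower c = true ↔ 97 ≤ c.toNat ∧ c.toNat ≤ 122 := by
  simp only [pvLower, Bool.and_eq_true, decide_eq_true_eq]
  constructor
  · rintro ⟨h1, h2⟩
    rw [Char.le_def, UInt32.le_iff_toNat_le] at h1 h2
    exact ⟨h1, h2⟩
  · rintro ⟨h1, h2⟩
    simp only [Char.toNat] at h1 h2
    exact ⟨by rw [Char.le_def, UInt32.le_iff_toNat_le]; exact h1,
           by rw [Char.le_def, UInt32.le_iff_toNat_le]; exact h2⟩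

theorem key_iff (L : List Char) :
    (∃ a ∈ alfabeto, ∃ b ∈ alfabeto, ∃ c ∈ alfabeto, ∃ d ∈ alfabeto, ∃ e ∈ alfabeto,
        a ++ b ++ c ++ d ++ e = L) ↔
      (L.length = 5 ∧ L.all pvLower) := by
  constructor
  · rintro ⟨a, ha, b, hb, c, hc, d, hd, e, he, rfl⟩
    obtain ⟨c1, rfl, h1, h1'⟩ := bounds_of_mem_alfabeto a ha
    obtain ⟨c2, rfl, h2, h2'⟩ := bounds_of_mem_alfabeto b hb
    obtain ⟨c3, rfl, h3, h3'⟩ := bounds_of_mem_alfabeto c hc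
    obtain ⟨c4, rfl, h4, h4'⟩ := bounds_of_mem_alfabeto d hd
    obtain ⟨c5, rfl, h5, h5'⟩ := bounds_of_mem_alfabeto e he
    refine ⟨rfl, ?_⟩
    simp only [List.all_eq_true]
    intro x hx
    simp only [List.cons_append, List.nil_append, List.mem_cons, List.not_mem_nil, or_false] at hx
    rcases hx with rfl|rfl|rfl|rfl|rfl <;> rw [pvLower_iff] <;> exact ⟨by assumption, by assumption⟩
  · rintro ⟨hlen, hall⟩
    match L, hlen with
    | [c1, c2, c3, c4, c5], _ =>
      simp only [List.all_eq_true, List.mem_cons, List.not_mem_nil, or_false] at hall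
      have b1 := (pvLower_iff c1).mp (hall c1 (by tauto))
      have b2 := (pvLower_iff c2).mp (hall c2 (by tauto))
      have b3 := (pvLower_iff c3).mp (hall c3 (by tauto))
      have b4 := (pvLower_iff c4).mp (hall c4 (by tauto))
      have b5 := (pvLower_iff c5).mp (hall c5 (by tauto))
      exact ⟨[c1], mem_alfabeto_of_bounds c1 b1.1 b1.2,
             [c2], mem_alfabeto_of_bounds c2 b2.1 b2.2,
             [c3], mem_alfabeto_of_bounds c3 b3.1 b3.2,
             [c4], mem_alfabeto_of_bounds c4 b4.1 b4.2,
             [c5], mem_alfabeto_of_bounds c5 b5.1 b5.2, rfl⟩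

-- ===== VERDICT (by name: the statement is the Claim_ definition above) =====
theorem process_spec : Claim_equal_process := by
  intro item _
  unfold Spec_process process process_alt
  rw [loopA_eq]
  by_cases h : item.toList.length = 5 ∧ item.toList.all pvLower
  · rw [if_pos ((key_iff item.toList).mpr h), if_pos h]
  · rw [if_neg (fun hc => h ((key_iff item.toList).mp hc)), if_neg h]
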